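-- pv_equiv track=rewrite | github.com/tal-sharon/intro2cs | ex08/puzzle_solver.py | get_all_pos_cons
-- ===== SOURCE A (Python) =====
-- from typing import List, Tuple, Set, Optional
--
-- Picture = List[List[int]]
--
-- Constraint = Tuple[int, int, int]
--
-- def min_seen_cells(picture: Picture, row: int, col: int) -> int:
--     count = 0
--     if picture[row][col] == 0 or picture[row][col] == -1:
--         return count
--     # up
--     for up in range(row - 1, -1, -1):
--         if picture[up][col] == 0 or picture[up][col] == -1:
--             break
--         if picture[up][col] == 1:
--             count += 1
--     # down
--     for down in range(row, len(picture)):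
--         if picture[down][col] == 0 or picture[down][col] == -1:
--             break
--         if picture[down][col] == 1:
--             count += 1
--     # left
--     for left in range(col - 1, -1, -1):
--         if picture[row][left] == 0 or picture[row][left] == -1:
--             break
--         if picture[row][left] == 1:
--             count += 1
--     # right
--     for right in range(col + 1, len(picture[0])):
--         if picture[row][right] == 0 or picture[row][right] == -1:
--             break
--         if picture[row][right] == 1:
--             count += 1
--     return count
--
-- def get_all_pos_cons(picture: Picture) -> List[Constraint]:
--     """
--     gets all possible constraints out of a solution
--     :param picture: the picture and solution
--     :return: the possible constraints list
--     """
--     constraints_set = []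
--     for row in range(len(picture)):
--         for col in range(len(picture[0])):
--             if picture[row][col] == 0:
--                 constraints_set.append((row, col, 0))
--             else:
--                 seen = min_seen_cells(picture, row, col)
--                 constraints_set.append((row, col, seen))
--     return constraints_set
-- ===== SOURCE B (Python) =====
-- def _inc(vs):
--     # inclusive run counts: out[i] = number of 1s from i onward until the first 0/-1 (0 if vs[i] blocks)
--     out = [0] * len(vs)
--     run = 0
--     for i in range(len(vs) - 1, -1, -1):
--         v = vs[i]
--         run = 0 if (v == 0 or v == -1) else run + (v == 1)
--         out[i] = run
--     return out
--
-- def get_all_pos_cons(picture):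
--     rows, cols = len(picture), (len(picture[0]) if picture else 0)
--     grid = [row[:cols] for row in picture]           # the grid is rows x cols (cols = width of the first row)
--     right_inc = [_inc(row) for row in grid]
--     left_inc = [_inc(row[::-1])[::-1] for row in grid]
--     colsv = [[grid[r][c] for r in range(rows)] for c in range(cols)]
--     down_inc = [_inc(cv) for cv in colsv]
--     up_inc = [_inc(cv[::-1])[::-1] for cv in colsv]
--     res = []
--     for r in range(rows):
--         for c in range(cols):
--             v = picture[r][c]
--             if v == 0 or v == -1:
--                 res.append((r, c, 0))
--             else:
--                 seen = down_inc[c][r] \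
--                      + (up_inc[c][r - 1] if r > 0 else 0) \
--                      + (left_inc[r][c - 1] if c > 0 else 0) \
--                      + (right_inc[r][c + 1] if c + 1 < cols else 0)
--                 res.append((r, c, seen))
--     return res
-- ===== Notes on version B (the rewrite author's own statement) =====
-- stated objective: faster
-- what changed: A rescans all four directions from every cell (min_seen_cells per cell); B precomputes directional run-length 1-counts with four linear passes over rows and columns and sums four table lookups per cell.
import Mathlib
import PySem

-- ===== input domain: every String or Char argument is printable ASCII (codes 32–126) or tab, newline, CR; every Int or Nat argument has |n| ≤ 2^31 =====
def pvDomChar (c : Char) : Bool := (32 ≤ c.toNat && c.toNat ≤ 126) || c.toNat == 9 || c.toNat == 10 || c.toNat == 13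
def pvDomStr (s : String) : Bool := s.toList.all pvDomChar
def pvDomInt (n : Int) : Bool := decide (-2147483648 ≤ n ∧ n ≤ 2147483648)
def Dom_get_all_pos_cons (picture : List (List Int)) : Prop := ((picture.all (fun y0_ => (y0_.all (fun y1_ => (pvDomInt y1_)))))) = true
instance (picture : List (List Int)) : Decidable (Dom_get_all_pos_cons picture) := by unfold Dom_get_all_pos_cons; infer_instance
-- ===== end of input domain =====

-- B replaces A's per-cell four-directional rescans by four linear run-count passes over rows and
-- columns, summed per cell; equal return value on every input where A returns (Pre_).

-- ===== PORT A =====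
-- picture[r][c]; exact on Pre_ (all indices used are in range there)
def pvCell (p : List (List Int)) (r c : Nat) : Int := (p.getD r []).getD c 0

-- the 'up'/'left' loops of min_seen_cells: visit indices i-1, i-2, …, 0, break at 0/-1, count 1s
def pvScanDec (f : Nat → Int) : Nat → Int
  | 0 => 0
  | i + 1 =>
    let v := f i
    if v = 0 ∨ v = -1 then 0 else (if v = 1 then 1 else 0) + pvScanDec f i

-- the 'down'/'right' loops: visit indices i, i+1, … (fuel = how many remain), break at 0/-1, count 1s
def pvScanInc (f : Nat → Int) : Nat → Nat → Int
  | 0, _ => 0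
  | fuel + 1, i =>
    let v := f i
    if v = 0 ∨ v = -1 then 0 else (if v = 1 then 1 else 0) + pvScanInc f fuel (i + 1)

def min_seen_cells (p : List (List Int)) (row col : Nat) : Int :=
  let v := pvCell p row col
  if v = 0 ∨ v = -1 then 0
  else
    pvScanDec (fun i => pvCell p i col) row
    + pvScanInc (fun i => pvCell p i col) (p.length - row) row
    + pvScanDec (fun j => pvCell p row j) col
    + pvScanInc (fun j => pvCell p row j) ((p.headD []).length - (col + 1)) (col + 1)

def pvACell (p : List (List Int)) (row col : Nat) : List Int :=
  if pvCell p row col = 0 then [(row : Int), (col : Int), 0]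
  else [(row : Int), (col : Int), min_seen_cells p row col]

def get_all_pos_cons (picture : List (List Int)) : List (List Int) :=
  (List.range picture.length).flatMap (fun row =>
    (List.range (picture.headD []).length).map (fun col => pvACell picture row col))

-- ===== PORT B =====
def pvBStep (v run : Int) : Int := if v == 0 || v == -1 then 0 else run + (if v == 1 then 1 else 0)

-- Source B's _inc: backward pass carrying the running in-run count of 1s
def pvInc : List Int → List Int
  | [] => []
  | v :: rest =>
    let t := pvInc rest
    pvBStep v (t.headD 0) :: t

-- _inc(vs[::-1])[::-1]
def pvDec (vs : List Int) : List Int := (pvInc vs.reverse).reverse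

def get_all_pos_cons_alt (picture : List (List Int)) : List (List Int) :=
  let rows := picture.length
  let cols := (picture.headD []).length
  let grid := picture.map (fun row => row.take cols)
  let rightInc := grid.map pvInc
  let leftInc := grid.map pvDec
  let colsv := (List.range cols).map (fun c => (List.range rows).map (fun r => (grid.getD r []).getD c 0))
  let downInc := colsv.map pvInc
  let upInc := colsv.map pvDec
  (List.range rows).flatMap (fun r =>
    (List.range cols).map (fun c =>
      let v := (picture.getD r []).getD c 0
      if v = 0 ∨ v = -1 then [(r : Int), (c : Int), 0]
      else [(r : Int), (c : Int),
        (downInc.getD c []).getD r 0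
        + (if 0 < r then (upInc.getD c []).getD (r - 1) 0 else 0)
        + (if 0 < c then (leftInc.getD r []).getD (c - 1) 0 else 0)
        + (if c + 1 < cols then (rightInc.getD r []).getD (c + 1) 0 else 0)]))

-- ===== PRECONDITION & SPEC =====
-- Pre_ is exactly where the Python A returns: every row at least as long as the first
-- (a shorter row makes picture[row][col] raise IndexError for some col < len(picture[0])).
def Pre_get_all_pos_cons (picture : List (List Int)) : Prop :=
  ∀ row ∈ picture, (picture.headD []).length ≤ row.length
instance (picture : List (List Int)) : Decidable (Pre_get_all_pos_cons picture) := by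
  unfold Pre_get_all_pos_cons; infer_instance

def pvWitness_get_all_pos_cons : List (List Int) := [[1, 0], [1, 1]]

def Spec_get_all_pos_cons (picture : List (List Int)) (out : List (List Int)) : Prop :=
  out = get_all_pos_cons_alt picture
instance (picture : List (List Int)) (out : List (List Int)) : Decidable (Spec_get_all_pos_cons picture out) := by
  unfold Spec_get_all_pos_cons; infer_instance

-- ===== CLAIM (what is proved, stated in full; the proofs are below) =====
def Claim_equal_get_all_pos_cons : Prop :=
  ∀ (picture : List (List Int)), Dom_get_all_pos_cons picture → Pre_get_all_pos_cons picture →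
    Spec_get_all_pos_cons picture (get_all_pos_cons picture)

-- ===== LEMMAS AND PROOFS =====

-- the count of 1s in the longest 0/-1-free prefix of a value list: the common spec of all four scans
def pvSuffix : List Int → Int
  | [] => 0
  | v :: rest => if v = 0 ∨ v = -1 then 0 else (if v = 1 then 1 else 0) + pvSuffix rest

-- B's cell expression with the let-bound tables written out (definitionally what alt computes per cell)
def pvAltCell (p : List (List Int)) (r c : Nat) : List Int :=
  let n := p.length
  let m := (p.headD []).length
  let grid := p.map (fun row => row.take m)
  let colsv := (List.range m).map (fun c' => (List.range n).map (fun r' => (grid.getD r' []).getD c' 0))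
  let v := (p.getD r []).getD c 0
  if v = 0 ∨ v = -1 then [(r : Int), (c : Int), 0]
  else [(r : Int), (c : Int),
    ((colsv.map pvInc).getD c []).getD r 0
    + (if 0 < r then ((colsv.map pvDec).getD c []).getD (r - 1) 0 else 0)
    + (if 0 < c then ((grid.map pvDec).getD r []).getD (c - 1) 0 else 0)
    + (if c + 1 < m then ((grid.map pvInc).getD r []).getD (c + 1) 0 else 0)]

theorem pvAlt_eq_flatMap (p : List (List Int)) :
    get_all_pos_cons_alt p =
      (List.range p.length).flatMap (fun r =>
        (List.range (p.headD []).length).map (fun c => pvAltCell p r c)) := rfl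

theorem pvInc_length (vs : List Int) : (pvInc vs).length = vs.length := by
  induction vs with
  | nil => rfl
  | cons v rest ih => simp [pvInc, ih]

theorem pvInc_getD (vs : List Int) (i : Nat) : (pvInc vs).getD i 0 = pvSuffix (vs.drop i) := by
  induction vs generalizing i with
  | nil => simp [pvInc, pvSuffix]
  | cons v rest ih =>
    cases i with
    | zero =>
      have h0 : (pvInc rest).headD 0 = pvSuffix rest := by
        cases hrest : pvInc rest with
        | nil =>
          have : rest = [] := by
            have := pvInc_length rest; rw [hrest] at this; exact List.eq_nil_of_length_eq_zero this.symm
          simp [this, pvSuffix]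
        | cons a t =>
          have h := ih 0
          rw [hrest] at h
          simpa using h
      show pvBStep v ((pvInc rest).headD 0) = pvSuffix (v :: rest)
      rw [h0]
      by_cases hv : v = 0 ∨ v = -1
      · simp [pvBStep, pvSuffix, hv]
      · rw [not_or] at hv
        simp [pvBStep, pvSuffix, hv.1, hv.2]
        ring
    | succ j =>
      show (pvInc rest).getD j 0 = pvSuffix (rest.drop j)
      exact ih j

theorem pvScanDec_eq (f : Nat → Int) (r : Nat) :
    pvScanDec f r = pvSuffix (((List.range r).map f).reverse) := by
  induction r with
  | zero => simp [pvScanDec, pvSuffix]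
  | succ n ih =>
    rw [List.range_succ]
    simp [pvScanDec, pvSuffix, ih]

theorem pvScanInc_eq (f : Nat → Int) (fuel i : Nat) :
    pvScanInc f fuel i = pvSuffix ((List.range fuel).map (fun j => f (i + j))) := by
  induction fuel generalizing i with
  | zero => simp [pvScanInc, pvSuffix]
  | succ n ih =>
    have hmap : (List.range (n + 1)).map (fun j => f (i + j))
        = f i :: (List.range n).map (fun j => f ((i + 1) + j)) := by
      rw [List.range_succ_eq_map, List.map_cons, List.map_map]
      refine congrArg₂ _ (by simp) (List.map_congr_left ?_)
      intro j _
      show f (i + (j + 1)) = f ((i + 1) + j)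
      congr 1
      omega
    rw [hmap]
    simp [pvScanInc, pvSuffix, ih (i + 1)]

theorem pvTake_eq_map_range (l : List Int) (m : Nat) (h : m ≤ l.length) :
    l.take m = (List.range m).map (fun j => l.getD j 0) := by
  apply List.ext_getElem
  · simp [h]
  · intro i h1 h2
    simp only [List.getElem_take, List.getElem_map, List.getElem_range]
    exact (List.getD_eq_getElem l 0 (by simp at h1; omega)).symm

theorem pvDrop_map_range (f : Nat → Int) (n r : Nat) :
    ((List.range n).map f).drop r = (List.range (n - r)).map (fun j => f (r + j)) := by
  apply List.ext_getElem
  · simp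
  · intro i h1 h2
    simp [List.getElem_drop]

theorem pvTake_map_range (f : Nat → Int) (n r : Nat) (h : r ≤ n) :
    ((List.range n).map f).take r = (List.range r).map f := by
  rw [← List.map_take, List.take_range, Nat.min_eq_left h]

theorem pvDec_getD (vs : List Int) (i : Nat) (h : i < vs.length) :
    (pvDec vs).getD i 0 = pvSuffix ((vs.take (i + 1)).reverse) := by
  have hlen : (pvInc vs.reverse).length = vs.length := by simp [pvInc_length]
  have h1 : (pvDec vs).getD i 0 = (pvInc vs.reverse).getD (vs.length - 1 - i) 0 := by
    unfold pvDec
    rw [List.getD_eq_getElem _ _ (by simp [hlen, h]), List.getElem_reverse,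
        List.getD_eq_getElem _ _ (by omega)]
    simp [hlen]
  rw [h1, pvInc_getD, List.reverse_take]
  congr 2
  omega

theorem pvTake_getD (l : List Int) (m i : Nat) (hi : i < m) (him : m ≤ l.length) :
    (l.take m).getD i 0 = l.getD i 0 := by
  rw [List.getD_eq_getElem _ _ (by rw [List.length_take]; omega), List.getElem_take,
      List.getD_eq_getElem _ _ (by omega)]

theorem pvMapTable (g : List Int → List Int) (L : List (List Int)) (i : Nat) (hi : i < L.length) :
    (L.map g).getD i [] = g (L.getD i []) := by
  rw [List.getD_eq_getElem _ _ (by simpa using hi), List.getElem_map,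
      List.getD_eq_getElem _ _ hi]

theorem pvIncTable (L : List (List Int)) (i j : Nat) (hi : i < L.length) :
    ((L.map pvInc).getD i []).getD j 0 = pvSuffix ((L.getD i []).drop j) := by
  rw [pvMapTable _ _ _ hi, pvInc_getD]

theorem pvDecTable (L : List (List Int)) (i j : Nat) (hi : i < L.length)
    (hj : j < (L.getD i []).length) :
    ((L.map pvDec).getD i []).getD j 0 = pvSuffix (((L.getD i []).take (j + 1)).reverse) := by
  rw [pvMapTable _ _ _ hi, pvDec_getD _ _ hj]

-- the per-cell agreement: A's four directional scans equal B's table lookups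
theorem pvCell_eq (p : List (List Int)) (hpre : Pre_get_all_pos_cons p) (r c : Nat)
    (hr : r < p.length) (hc : c < (p.headD []).length) :
    pvACell p r c = pvAltCell p r c := by
  have hrow : ∀ i, i < p.length → (p.headD []).length ≤ (p.getD i []).length := by
    intro i hi
    rw [List.getD_eq_getElem _ _ hi]
    exact hpre _ (List.getElem_mem _)
  have hgrid : ∀ i, i < p.length →
      (p.map (fun row => row.take (p.headD []).length)).getD i []
        = (p.getD i []).take (p.headD []).length := by
    intro i hi
    rw [List.getD_eq_getElem _ _ (by simpa using hi), List.getElem_map,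
        List.getD_eq_getElem _ _ hi]
  have hgcell : ∀ i c', i < p.length → c' < (p.headD []).length →
      ((p.map (fun row => row.take (p.headD []).length)).getD i []).getD c' 0
        = (p.getD i []).getD c' 0 := by
    intro i c' hi hc'
    rw [hgrid i hi, pvTake_getD _ _ _ hc' (hrow i hi)]
  have hcolsv : ((List.range (p.headD []).length).map (fun c' => (List.range p.length).map
        (fun r' => ((p.map (fun row => row.take (p.headD []).length)).getD r' []).getD c' 0))).getD c []
      = (List.range p.length).map (fun i => (p.getD i []).getD c 0) := by
    rw [PySem.List.getD_map_range _ _ _ _ hc]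
    exact List.map_congr_left (fun i hi => hgcell i c (by simpa using hi) hc)
  have hgr : (p.map (fun row => row.take (p.headD []).length)).getD r []
      = (p.getD r []).take (p.headD []).length := hgrid r hr
  have hrowmap : (p.getD r []).take (p.headD []).length
      = (List.range (p.headD []).length).map (fun j => (p.getD r []).getD j 0) :=
    pvTake_eq_map_range _ _ (hrow r hr)
  have hDown : ((((List.range (p.headD []).length).map (fun c' => (List.range p.length).map
        (fun r' => ((p.map (fun row => row.take (p.headD []).length)).getD r' []).getD c' 0))).map pvInc).getD c []).getD r 0
      = pvScanInc (fun i => (p.getD i []).getD c 0) (p.length - r) r := by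
    rw [pvIncTable _ _ _ (by simpa using hc), hcolsv, pvDrop_map_range]
    exact (pvScanInc_eq (fun i => (p.getD i []).getD c 0) (p.length - r) r).symm
  have hUp : (if 0 < r then ((((List.range (p.headD []).length).map (fun c' => (List.range p.length).map
        (fun r' => ((p.map (fun row => row.take (p.headD []).length)).getD r' []).getD c' 0))).map pvDec).getD c []).getD (r - 1) 0 else 0)
      = pvScanDec (fun i => (p.getD i []).getD c 0) r := by
    cases r with
    | zero => simp [pvScanDec]
    | succ k =>
      simp only [if_pos (Nat.succ_pos k), Nat.succ_sub_one]
      rw [pvDecTable _ _ _ (by simpa using hc) (by rw [hcolsv]; simp; omega), hcolsv,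
          pvTake_map_range _ _ _ (by omega)]
      exact (pvScanDec_eq _ _).symm
  have hLeft : (if 0 < c then (((p.map (fun row => row.take (p.headD []).length)).map pvDec).getD r []).getD (c - 1) 0 else 0)
      = pvScanDec (fun j => (p.getD r []).getD j 0) c := by
    cases c with
    | zero => simp [pvScanDec]
    | succ k =>
      simp only [if_pos (Nat.succ_pos k), Nat.succ_sub_one]
      rw [pvDecTable _ _ _ (by simpa using hr) (by have := hrow r hr; rw [hgr, List.length_take]; omega), hgr,
          List.take_take, Nat.min_eq_left (by omega),
          pvTake_eq_map_range _ _ (by have := hrow r hr; omega)]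
      exact (pvScanDec_eq _ _).symm
  have hRight : (if c + 1 < (p.headD []).length then (((p.map (fun row => row.take (p.headD []).length)).map pvInc).getD r []).getD (c + 1) 0 else 0)
      = pvScanInc (fun j => (p.getD r []).getD j 0) ((p.headD []).length - (c + 1)) (c + 1) := by
    by_cases hcm : c + 1 < (p.headD []).length
    · simp only [if_pos hcm]
      rw [pvIncTable _ _ _ (by simpa using hr), hgr, hrowmap, pvDrop_map_range]
      exact (pvScanInc_eq (fun j => (p.getD r []).getD j 0) ((p.headD []).length - (c + 1)) (c + 1)).symm
    · simp only [if_neg hcm]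
      have hz : (p.headD []).length - (c + 1) = 0 := by omega
      rw [hz]
      rfl
  simp only [pvACell, pvAltCell, min_seen_cells, pvCell]
  by_cases h0 : (p.getD r []).getD c 0 = 0
  · rw [if_pos h0, if_pos (Or.inl h0)]
  by_cases h1 : (p.getD r []).getD c 0 = -1
  · rw [if_neg h0, if_pos (Or.inr h1), if_pos (Or.inr h1)]
  have hcond : ¬((p.getD r []).getD c 0 = 0 ∨ (p.getD r []).getD c 0 = -1) :=
    not_or.mpr ⟨h0, h1⟩
  rw [if_neg h0, if_neg hcond, if_neg hcond]
  refine congrArg (fun x => [(r : Int), (c : Int), x]) ?_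
  rw [hDown, hUp, hLeft, hRight]
  ring

-- ===== VERDICT (by name: the statement is the Claim_ definition above) =====
theorem get_all_pos_cons_spec : Claim_equal_get_all_pos_cons := by
  intro p _hdom hpre
  show get_all_pos_cons p = get_all_pos_cons_alt p
  rw [pvAlt_eq_flatMap]
  unfold get_all_pos_cons
  refine List.flatMap_congr ?_
  intro r hrmem
  refine List.map_congr_left ?_
  intro c hcmem
  exact pvCell_eq p hpre r c (by simpa using hrmem) (by simpa using hcmem)
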